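-- pv_equiv track=rewrite | github.com/amanuelanteneh/Binary-GBS-Kernel | GBS-nu/Bin-GBS-Kernel-b-15k-PCA.py | generateSampleSpace
-- ===== SOURCE A (Python) =====
-- import itertools
--
-- def generateSampleSpace(n, k):
--
--     result = []
--     for bits in itertools.combinations(range(n), k):
--         s = ['0'] * n
--         for bit in bits:
--             s[bit] = '1'
--         result.append(list(map(int, ''.join(s))))
--     return result
-- ===== SOURCE B (Python) =====
-- def generateSampleSpace(n, k):
--     # Pascal-style recursion: rows with k ones among n slots, lexicographic in the 1-positions.
--     if k < 0:
--         return []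
--     def rows(n, k):
--         if k == 0:
--             return [[0] * n]
--         if k > n:
--             return []
--         return [[1] + r for r in rows(n - 1, k - 1)] + [[0] + r for r in rows(n - 1, k)]
--     return rows(n, k)
-- ===== Notes on version B (the rewrite author's own statement) =====
-- stated objective: alternative
-- what changed: Replaces itertools.combinations plus per-combination string mutation/join with a direct Pascal-style recursion that builds each binary row front-to-back (prepend 1 / prepend 0).
import Mathlib
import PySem

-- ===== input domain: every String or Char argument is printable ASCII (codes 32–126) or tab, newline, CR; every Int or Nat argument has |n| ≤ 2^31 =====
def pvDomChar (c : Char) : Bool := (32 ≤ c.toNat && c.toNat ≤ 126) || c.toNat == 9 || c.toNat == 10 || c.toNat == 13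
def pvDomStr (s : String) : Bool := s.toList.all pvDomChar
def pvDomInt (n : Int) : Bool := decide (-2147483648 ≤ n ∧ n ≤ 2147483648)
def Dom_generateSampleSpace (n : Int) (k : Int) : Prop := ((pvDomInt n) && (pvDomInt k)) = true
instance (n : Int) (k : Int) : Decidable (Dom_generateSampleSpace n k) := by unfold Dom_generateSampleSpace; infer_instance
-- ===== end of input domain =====

-- B replaces itertools.combinations + string mutation with a Pascal-style recursion (alternative decomposition, same cost).


-- ===== PORT A =====
-- itertools.combinations(xs, k): lexicographic k-combinations (library call ported as a helper)
def pvCombs {α : Type} : List α → Nat → List (List α)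
  | _, 0 => [[]]
  | [], _ + 1 => []
  | x :: xs, k + 1 =>
    if xs.length < k then []  -- itertools.combinations: r > len(pool) yields nothing
    else ((pvCombs xs k).map (x :: ·)) ++ pvCombs xs (k + 1)

-- the loop body: s = ['0']*n; for bit in bits: s[bit] = '1'; list(map(int, ''.join(s)))
def pvRow (n : Nat) (bits : List Nat) : List Int :=
  ((bits.foldl (fun s b => s.set b '1') (List.replicate n '0')).map
    (fun c => if c = '1' then (1 : Int) else 0))

def generateSampleSpace (n : Int) (k : Int) : List (List Int) :=
  (pvCombs (List.range n.toNat) k.toNat).map (pvRow n.toNat)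

-- ===== PORT B =====
-- rows(n,k) from Source B, with fuel n.toNat+1 only to make the recursion total; [0]*n = replicate n.toNat 0
def pvRowsAux : Nat → Int → Int → List (List Int)
  | 0, _, _ => []
  | fuel + 1, n, k =>
    if k = 0 then [List.replicate n.toNat 0]
    else if k > n then []
    else ((pvRowsAux fuel (n - 1) (k - 1)).map (fun r => 1 :: r)) ++
         ((pvRowsAux fuel (n - 1) k).map (fun r => 0 :: r))

def generateSampleSpace_alt (n : Int) (k : Int) : List (List Int) :=
  if k < 0 then [] else pvRowsAux (n.toNat + 1) n k

-- ===== PRECONDITION & SPEC =====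
-- Pre_ excludes exactly k < 0, where A raises ValueError (itertools.combinations rejects negative r).
def Pre_generateSampleSpace (n : Int) (k : Int) : Prop := 0 ≤ k
instance (n : Int) (k : Int) : Decidable (Pre_generateSampleSpace n k) := by unfold Pre_generateSampleSpace; infer_instance
def pvWitness_generateSampleSpace : Int × Int := (4, 2)

def Spec_generateSampleSpace (n : Int) (k : Int) (out : List (List Int)) : Prop := out = generateSampleSpace_alt n k
instance (n : Int) (k : Int) (out : List (List Int)) : Decidable (Spec_generateSampleSpace n k out) := by unfold Spec_generateSampleSpace; infer_instance

-- ===== CLAIM (what is proved, stated in full; the proofs are below) =====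
def Claim_equal_generateSampleSpace : Prop := ∀ (n : Int) (k : Int), Dom_generateSampleSpace n k → Pre_generateSampleSpace n k → Spec_generateSampleSpace n k (generateSampleSpace n k)

-- ===== LEMMAS AND PROOFS =====

-- Nat-indexed version of B's recursion (proof helper)
def pvP : Nat → Nat → List (List Int)
  | n, 0 => [List.replicate n 0]
  | 0, _ + 1 => []
  | n + 1, k + 1 => ((pvP n k).map (fun r => 1 :: r)) ++ ((pvP n (k + 1)).map (fun r => 0 :: r))

lemma pvP_eq_nil {n k : Nat} (h : n < k) : pvP n k = [] := by
  induction n generalizing k with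
  | zero => cases k with
    | zero => omega
    | succ j => simp [pvP]
  | succ m ih =>
    cases k with
    | zero => omega
    | succ j =>
      simp [pvP]
      constructor <;> [exact ih (by omega); exact ih (by omega)]

lemma pvRowsAux_eq_pvP (fuel : Nat) (n k : Int) (hk : 0 ≤ k) (hf : n.toNat < fuel) :
    pvRowsAux fuel n k = pvP n.toNat k.toNat := by
  induction fuel generalizing n k with
  | zero => omega
  | succ f ih =>
    by_cases h0 : k = 0
    · subst h0; simp [pvRowsAux]
      cases hn : n.toNat with
      | zero => simp [pvP]
      | succ m => simp [pvP]
    · have hk1 : 1 ≤ k := by omega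
      by_cases hkn : k > n
      · have : n.toNat < k.toNat := by omega
        simp [pvRowsAux, h0, hkn, pvP_eq_nil this]
      · have hn1 : 1 ≤ n := by omega
        have e1 : n.toNat = (n - 1).toNat + 1 := by omega
        have e2 : k.toNat = (k - 1).toNat + 1 := by omega
        rw [pvRowsAux, if_neg h0, if_neg hkn,
            ih (n - 1) (k - 1) (by omega) (by omega),
            ih (n - 1) k hk (by omega), e1, e2, pvP, ← e2]

-- indicator row
def pvInd (n : Nat) (bits : List Nat) : List Int :=
  (List.range n).map (fun i => if i ∈ bits then (1 : Int) else 0)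

lemma pvFold_set (bits : List Nat) (s : List Char) (hb : ∀ b ∈ bits, b < s.length) :
    bits.foldl (fun s b => s.set b '1') s =
      (List.range s.length).map (fun i => if i ∈ bits then '1' else s[i]!) := by
  induction bits generalizing s with
  | nil =>
    simp only [List.foldl_nil, List.not_mem_nil, if_false]
    refine List.ext_getElem (by simp) ?_
    intro i h1 h2
    simp_all [List.getElem!_eq_getElem?_getD, List.getElem?_eq_getElem]
  | cons b bs ih =>
    simp only [List.foldl_cons]
    rw [ih _ (by intro x hx; have := hb x (by simp [hx]); simpa using this)]
    have hbl : b < s.length := hb b (by simp)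
    refine List.ext_getElem (by simp) ?_
    intro i h1 h2
    simp only [List.getElem_map, List.getElem_range, List.length_map, List.length_range] at *
    have hi : i < s.length := by simpa using h1
    by_cases hib : i ∈ bs
    · simp [hib]
    · by_cases hie : i = b
      · subst hie
        have hlen : i < (s.set i '1').length := by simpa using hi
        simp only [hib, if_false, List.getElem!_eq_getElem?_getD,
          List.getElem?_eq_getElem hlen]
        simp
      · have hni : ¬ i ∈ b :: bs := by simp [hib, hie]
        have hlen : i < (s.set b '1').length := by simpa using hi
        simp only [hib, hni, if_false, List.getElem!_eq_getElem?_getD,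
          List.getElem?_eq_getElem hlen, List.getElem?_eq_getElem hi]
        rw [List.getElem_set_ne (by omega)]

lemma pvRow_eq_pvInd (n : Nat) (bits : List Nat) (hb : ∀ b ∈ bits, b < n) :
    pvRow n bits = pvInd n bits := by
  unfold pvRow pvInd
  rw [pvFold_set bits _ (by simpa using hb)]
  simp only [List.length_replicate, List.map_map]
  refine List.map_congr_left ?_
  intro i hi
  simp only [List.mem_range] at hi
  by_cases h : i ∈ bits
  · simp [h, Function.comp]
  · simp [h, Function.comp, List.getElem!_eq_getElem?_getD, List.getElem?_eq_getElem
      (by simpa using hi : i < (List.replicate n '0').length)]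

lemma pvCombs_subset {α : Type} {l : List α} {k : Nat} {c : List α}
    (hc : c ∈ pvCombs l k) : ∀ x ∈ c, x ∈ l := by
  induction l generalizing k c with
  | nil =>
    cases k with
    | zero => simp [pvCombs] at hc; subst hc; simp
    | succ j => simp [pvCombs] at hc
  | cons a l ih =>
    cases k with
    | zero => simp [pvCombs] at hc; subst hc; simp
    | succ j =>
      by_cases hlen : l.length < j
      · simp [pvCombs, hlen] at hc
      · simp only [pvCombs, if_neg hlen, List.mem_append, List.mem_map] at hc
        rcases hc with ⟨c', hc', rfl⟩ | hc
        · intro x hx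
          rcases List.mem_cons.mp hx with rfl | hx
          · simp
          · exact List.mem_cons_of_mem _ (ih hc' x hx)
        · intro x hx; exact List.mem_cons_of_mem _ (ih hc x hx)

lemma pvCombs_map {α β : Type} (f : α → β) (l : List α) (k : Nat) :
    pvCombs (l.map f) k = (pvCombs l k).map (List.map f) := by
  induction l generalizing k with
  | nil => cases k <;> simp [pvCombs]
  | cons a l ih =>
    cases k with
    | zero => simp [pvCombs]
    | succ j =>
      by_cases hlen : l.length < j
      · simp [pvCombs, hlen]
      · simp [pvCombs, hlen, ih, List.map_map, Function.comp]

lemma pvInd_zero_succ (n : Nat) (bits : List Nat) :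
    pvInd (n + 1) (0 :: bits.map Nat.succ) = 1 :: pvInd n bits := by
  unfold pvInd
  rw [List.range_succ_eq_map]
  simp [List.map_map, Function.comp, Nat.succ_eq_add_one]

lemma pvInd_succ (n : Nat) (bits : List Nat) :
    pvInd (n + 1) (bits.map Nat.succ) = 0 :: pvInd n bits := by
  unfold pvInd
  rw [List.range_succ_eq_map]
  simp [List.map_map, Function.comp, Nat.succ_eq_add_one]

lemma pvMain (n k : Nat) :
    (pvCombs (List.range n) k).map (pvRow n) = pvP n k := by
  have key : ∀ n k, (pvCombs (List.range n) k).map (pvInd n) = pvP n k := by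
    intro n
    induction n with
    | zero =>
      intro k
      cases k with
      | zero => simp [pvCombs, pvP, pvInd]
      | succ j => simp [pvCombs, pvP]
    | succ m ih =>
      intro k
      cases k with
      | zero =>
        simp [pvCombs, pvP, pvInd]
      | succ j =>
        rw [List.range_succ_eq_map]
        by_cases hlen : m < j
        · rw [show pvCombs (0 :: (List.range m).map Nat.succ) (j + 1) =
              [] from by simp [pvCombs, hlen], pvP_eq_nil (by omega)]
          simp
        · simp only [pvCombs, List.length_map, List.length_range, if_neg hlen,
            List.map_append, List.map_map]
          rw [pvCombs_map, pvCombs_map]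
          simp only [List.map_map]
          rw [pvP]
          congr 1
          · rw [← ih j]
            simp only [List.map_map]
            refine List.map_congr_left ?_
            intro c _
            simp only [Function.comp]
            exact pvInd_zero_succ m c
          · rw [← ih (j + 1)]
            simp only [List.map_map]
            refine List.map_congr_left ?_
            intro c _
            simp only [Function.comp]
            exact pvInd_succ m c
  rw [← key n k]
  refine List.map_congr_left ?_
  intro c hc
  exact pvRow_eq_pvInd n c (fun x hx => by
    simpa using List.mem_range.mp (pvCombs_subset hc x hx))

-- ===== VERDICT (by name: the statement is the Claim_ definition above) =====
theorem generateSampleSpace_spec : Claim_equal_generateSampleSpace := by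
  intro n k _ hk
  have hk' : (0 : Int) ≤ k := hk
  unfold Spec_generateSampleSpace generateSampleSpace generateSampleSpace_alt
  rw [if_neg (by omega : ¬ k < 0),
    pvRowsAux_eq_pvP (n.toNat + 1) n k hk' (by omega)]
  exact pvMain n.toNat k.toNat
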